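-- pv_equiv track=rewrite | github.com/linglingithub/myhello | freq/create_maximum_number.py | merge_max_wrong
-- ===== SOURCE A (Python) =====
-- def merge_max_wrong(arr1, arr2):  # ok for case 4, wrong for case 5
--     """
--     arr1 = [2, 5, 6, 4, 4, 0]
--     arr2 = [7, 3, 8, 0, 6, 5, 7, 6, 2]
--     check for the above case, when there are equal digit, arr1[-1] and arr2[3], which to choose and move the index?
--     should choose the with bigger following digit.
--     :param arr1:
--     :param arr2:
--     :return: list of merged result
--     """
--     # if len(arr1) < len(arr2):
--     #     arr1, arr2 = arr2, arr1
--     i, j = 0, 0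
--     res = []
--     while i < len(arr1) and j < len(arr2):
--         if arr1[i] > arr2[j]:
--             res.append(arr1[i])
--             i += 1
--         elif arr1[i] < arr2[j]:
--             res.append(arr2[j])
--             j += 1
--         else:   # check for equal cases
--             first = True
--             i2 = i
--             while i2 < len(arr1) and  arr1[i2] == arr1[i]:    # should not skip equal digits, because they also matters, case 5
--                 i2 += 1
--             sub1 = 0 if i2 >= len(arr1) else arr1[i2]
--             j2 = j
--             while j2 < len(arr2) and arr2[j2] == arr2[j]:
--                 j2 += 1
--             sub2 = 0 if j2 >= len(arr2) else arr2[j2]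
--             if sub2 > sub1:
--                 first = False
--             if first:
--                 res.append(arr1[i])
--                 i += 1
--             else:
--                 res.append(arr2[j])
--                 j += 1
--
--     if i < len(arr1):
--         res.extend(arr1[i:])
--     if j < len(arr2):
--         res.extend(arr2[j:])
--     return res
-- ===== SOURCE B (Python) =====
-- def _next_diff(arr):
--     # nd[k] = first value after index k that differs from arr[k], or 0 if none
--     n = len(arr)
--     nd = [0] * n
--     for k in range(n - 2, -1, -1):
--         nd[k] = arr[k + 1] if arr[k + 1] != arr[k] else nd[k + 1]
--     return nd
--
--
-- def merge_max_wrong(arr1, arr2):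
--     nd1 = _next_diff(arr1)
--     nd2 = _next_diff(arr2)
--     i, j = 0, 0
--     res = []
--     while i < len(arr1) and j < len(arr2):
--         a, b = arr1[i], arr2[j]
--         if a > b or (a == b and nd1[i] >= nd2[j]):
--             res.append(a)
--             i += 1
--         else:
--             res.append(b)
--             j += 1
--     res += arr1[i:]
--     res += arr2[j:]
--     return res
-- ===== Notes on version B (the rewrite author's own statement) =====
-- stated objective: faster
-- what changed: Replaces A's inner while-loop rescans of the equal-digit run at every tie by two precomputed next-different-digit arrays built in one right-to-left pass, making each tie-break O(1) and the whole merge O(n+m).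
import Mathlib
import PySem

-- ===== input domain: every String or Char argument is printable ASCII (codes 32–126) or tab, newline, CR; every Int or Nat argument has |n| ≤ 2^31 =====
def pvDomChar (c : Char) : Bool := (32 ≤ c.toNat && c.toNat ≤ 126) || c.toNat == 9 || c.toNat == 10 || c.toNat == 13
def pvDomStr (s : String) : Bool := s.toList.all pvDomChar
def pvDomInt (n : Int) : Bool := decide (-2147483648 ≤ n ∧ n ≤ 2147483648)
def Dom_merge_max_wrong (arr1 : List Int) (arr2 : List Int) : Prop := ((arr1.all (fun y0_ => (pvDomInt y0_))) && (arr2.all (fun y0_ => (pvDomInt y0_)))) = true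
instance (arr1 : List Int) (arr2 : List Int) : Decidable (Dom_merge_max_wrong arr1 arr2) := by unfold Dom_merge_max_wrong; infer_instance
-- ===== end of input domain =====

-- B replaces A's per-tie rescans of the equal-digit run by next-different-digit arrays
-- precomputed in one right-to-left pass, making each tie-break O(1) (objective: faster).


-- ===== PORT A =====
-- The index loops of A are ported over the corresponding suffixes (arr1[i:], arr2[j:]);
-- the fuel argument only makes the same computation total (it never runs out on the calls below).

-- inner `while i2 < len(arr) and arr[i2] == arr[i]` scan followed by A's
-- `sub = 0 if i2 >= len(arr) else arr[i2]`, over the suffix arr[i:] (v = arr[i])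
def pvSubRun (v : Int) : List Int → Int
  | [] => 0
  | x :: rest => if x = v then pvSubRun v rest else x

-- A's main `while i < len(arr1) and j < len(arr2)` loop, then the two tail extends
def pvLoopA (fuel : Nat) (s t : List Int) : List Int :=
  match fuel, s, t with
  | 0, s, t => s ++ t
  | _ + 1, [], t => [] ++ t
  | _ + 1, s, [] => s ++ []
  | f + 1, x :: s, y :: t =>
    if x > y then x :: pvLoopA f s (y :: t)
    else if x < y then y :: pvLoopA f (x :: s) t
    else
      let sub1 := pvSubRun x (x :: s)
      let sub2 := pvSubRun y (y :: t)
      let first : Bool := if sub2 > sub1 then false else true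
      if first then x :: pvLoopA f s (y :: t)
      else y :: pvLoopA f (x :: s) t

def merge_max_wrong (arr1 : List Int) (arr2 : List Int) : List Int :=
  pvLoopA (arr1.length + arr2.length) arr1 arr2

-- ===== PORT B =====

-- right-to-left pass of Source B's _next_diff as the obvious structural recursion on the suffix:
-- nd[k] = arr[k+1] if it differs from arr[k], else nd[k+1]; 0 at the end
def pvNextDiff : List Int → List Int
  | [] => []
  | x :: rest =>
    (match rest with
     | [] => (0 : Int)
     | y :: _ => if y ≠ x then y else (pvNextDiff rest).headD 0) :: pvNextDiff rest

-- Source B's single merge loop with O(1) tie-break (nd1/nd2 walked in lockstep with the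
-- suffixes), then the two tail extends; fuel only makes the same computation total
def pvLoopB (fuel : Nat) (s t nd1 nd2 : List Int) : List Int :=
  match fuel, s, t with
  | 0, s, t => s ++ t
  | _ + 1, [], t => [] ++ t
  | _ + 1, s, [] => s ++ []
  | f + 1, x :: s, y :: t =>
    if x > y ∨ (x = y ∧ nd1.headD 0 ≥ nd2.headD 0) then
      x :: pvLoopB f s (y :: t) nd1.tail nd2
    else
      y :: pvLoopB f (x :: s) t nd1 nd2.tail

def merge_max_wrong_alt (arr1 : List Int) (arr2 : List Int) : List Int :=
  pvLoopB (arr1.length + arr2.length) arr1 arr2 (pvNextDiff arr1) (pvNextDiff arr2)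

-- ===== PRECONDITION & SPEC =====
def Spec_merge_max_wrong (arr1 : List Int) (arr2 : List Int) (out : List Int) : Prop := out = merge_max_wrong_alt arr1 arr2
instance (arr1 : List Int) (arr2 : List Int) (out : List Int) : Decidable (Spec_merge_max_wrong arr1 arr2 out) := by unfold Spec_merge_max_wrong; infer_instance

-- ===== CLAIM (what is proved, stated in full; the proofs are below) =====
def Claim_equal_merge_max_wrong : Prop := ∀ (arr1 : List Int) (arr2 : List Int), Dom_merge_max_wrong arr1 arr2 → Spec_merge_max_wrong arr1 arr2 (merge_max_wrong arr1 arr2)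

-- ===== LEMMAS AND PROOFS =====

theorem pvNextDiff_cons (x : Int) (rest : List Int) :
    pvNextDiff (x :: rest) =
      (match rest with
       | [] => (0 : Int)
       | y :: _ => if y ≠ x then y else (pvNextDiff rest).headD 0) :: pvNextDiff rest := by
  rfl

-- the head of B's precomputed array is exactly A's tie-break scan value
theorem pvNextDiff_headD (x : Int) : ∀ (rest : List Int),
    (pvNextDiff (x :: rest)).headD 0 = pvSubRun x rest := by
  intro rest
  induction rest generalizing x with
  | nil => rfl
  | cons y r ih =>
    rw [pvNextDiff_cons]
    by_cases hyx : y = x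
    · subst hyx
      simp only [List.headD_cons, pvSubRun, ne_eq, not_true_eq_false,
        if_false]
      exact ih y
    · simp [pvSubRun, hyx]

theorem pvLoop_eq : ∀ (fuel : Nat) (s t : List Int),
    pvLoopA fuel s t = pvLoopB fuel s t (pvNextDiff s) (pvNextDiff t) := by
  intro fuel
  induction fuel with
  | zero => intro s t; rfl
  | succ f ih =>
    intro s t
    match s, t with
    | [], t => rfl
    | x :: s, [] => rfl
    | x :: s, y :: t =>
      rw [pvLoopA, pvLoopB]
      have hnd1 : (pvNextDiff (x :: s)).tail = pvNextDiff s := by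
        rw [pvNextDiff_cons]; rfl
      have hnd2 : (pvNextDiff (y :: t)).tail = pvNextDiff t := by
        rw [pvNextDiff_cons]; rfl
      have hsub1 : pvSubRun x (x :: s) = (pvNextDiff (x :: s)).headD 0 := by
        rw [pvNextDiff_headD, pvSubRun, if_pos rfl]
      have hsub2 : pvSubRun y (y :: t) = (pvNextDiff (y :: t)).headD 0 := by
        rw [pvNextDiff_headD, pvSubRun, if_pos rfl]
      by_cases hab : x > y
      · rw [if_pos hab, if_pos (Or.inl hab), hnd1, ih]
      · rw [if_neg hab]
        by_cases hba : x < y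
        · rw [if_pos hba, if_neg (by rintro (hc | ⟨hc, -⟩) <;> omega), hnd2, ih]
        · rw [if_neg hba]
          have heq : x = y := by omega
          simp only [hsub1, hsub2]
          by_cases hnd : (pvNextDiff (y :: t)).headD 0 > (pvNextDiff (x :: s)).headD 0
          · rw [if_pos hnd]
            simp only [Bool.false_eq_true, if_false]
            rw [if_neg (by rintro (hc | ⟨-, hge⟩) <;> omega), hnd2, ih]
          · rw [if_neg hnd]
            simp only [if_true]
            rw [if_pos (Or.inr ⟨heq, by omega⟩), hnd1, ih]

-- ===== VERDICT (by name: the statement is the Claim_ definition above) =====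
theorem merge_max_wrong_spec : Claim_equal_merge_max_wrong := by
  intro arr1 arr2 _
  unfold Spec_merge_max_wrong merge_max_wrong merge_max_wrong_alt
  exact pvLoop_eq (arr1.length + arr2.length) arr1 arr2
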